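-- pv_equiv track=rewrite | github.com/CNRResistanceAntibiotic/readMapper | readmapper/parser_readmapper/parse_arm_detection.py | no_change
-- ===== SOURCE A (Python) =====
-- def no_change(del_no_muts, del_keys, res_dic, key):
--     no_change_found = True
--     for n in res_dic[key]['mutations'].keys():
--         if res_dic[key]['mutations'][n]['known_change'] == '.' \
--                 and res_dic[key]['mutations'][n]['unknown_change'] == '.':
--             del_no_muts.append([key, n])
--         else:
--             no_change_found = False
--     if no_change_found:
--         del_keys.append(key)
--
--     return del_no_muts, del_keys
-- ===== SOURCE B (Python) =====
-- def no_change(del_no_muts, del_keys, res_dic, key):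
--     def go(items):
--         # recursively split the item list: returns (pairs to add, whether every
--         # remaining mutation is a no-change one), built back-to-front
--         if not items:
--             return [], True
--         (n, v), rest = items[0], items[1:]
--         pairs, clean = go(rest)
--         if v['known_change'] == '.' and v['unknown_change'] == '.':
--             return [[key, n]] + pairs, clean
--         return pairs, False
--     pairs, clean = go(list(res_dic[key]['mutations'].items()))
--     del_no_muts += pairs
--     if clean:
--         del_keys.append(key)
--     return del_no_muts, del_keys
-- ===== Notes on version B (the rewrite author's own statement) =====
-- stated objective: alternative
-- what changed: Replaces A's imperative loop over the keys with repeated dict lookups and a mutable boolean flag by a pure recursion over the (name, value) item pairs that builds the pair list back-to-front by prepending and propagates the all-clean verdict through the recursion.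
import Mathlib
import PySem

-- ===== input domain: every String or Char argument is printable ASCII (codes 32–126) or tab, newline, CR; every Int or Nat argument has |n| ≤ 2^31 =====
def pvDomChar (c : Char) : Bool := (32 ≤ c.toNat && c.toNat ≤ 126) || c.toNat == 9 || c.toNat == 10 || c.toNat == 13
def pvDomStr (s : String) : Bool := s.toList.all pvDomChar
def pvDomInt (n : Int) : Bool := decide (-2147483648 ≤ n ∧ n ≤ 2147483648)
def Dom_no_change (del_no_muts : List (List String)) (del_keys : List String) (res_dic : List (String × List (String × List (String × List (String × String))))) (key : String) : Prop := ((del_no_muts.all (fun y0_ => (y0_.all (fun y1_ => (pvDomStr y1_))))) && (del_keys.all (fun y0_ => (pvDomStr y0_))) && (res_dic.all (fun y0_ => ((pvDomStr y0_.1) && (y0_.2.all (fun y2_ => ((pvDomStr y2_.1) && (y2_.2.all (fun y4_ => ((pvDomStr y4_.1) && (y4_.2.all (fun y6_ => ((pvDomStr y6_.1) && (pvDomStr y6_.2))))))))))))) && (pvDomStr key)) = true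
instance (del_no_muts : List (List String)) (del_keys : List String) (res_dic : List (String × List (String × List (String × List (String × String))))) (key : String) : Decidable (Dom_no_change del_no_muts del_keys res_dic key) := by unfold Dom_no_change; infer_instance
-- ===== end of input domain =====

-- B replaces A's imperative key-loop with dict lookups and a mutable flag by a pure recursion
-- over the (name, value) item pairs building the pair list back-to-front; same cost, different shape.
-- Both A and B mutate del_no_muts/del_keys in place in Python; the equivalence proved here is
-- about the returned pair (which is those same lists).


-- ===== PORT A =====
-- Python dict lookup d[k] on an association list: first match; none = KeyError (excluded by Pre_).
def pvGetKey {β : Type} (d : List (String × β)) (k : String) : Option β :=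
  match d with
  | [] => none
  | (a, b) :: rest => if a == k then some b else pvGetKey rest k

-- A: loop over the KEYS of res_dic[key]['mutations'], looking each mutation up again,
-- appending [key, n] for '.'/'.' entries and clearing the no_change_found flag otherwise;
-- append key to del_keys if the flag survived.
def no_change (del_no_muts : List (List String)) (del_keys : List String) (res_dic : List (String × List (String × List (String × List (String × String))))) (key : String) : List (List String) × List String :=
  match pvGetKey res_dic key with
  | none => (del_no_muts, del_keys)   -- Python: KeyError (outside Pre_)
  | some entry =>
    match pvGetKey entry "mutations" with
    | none => (del_no_muts, del_keys) -- Python: KeyError (outside Pre_)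
    | some muts =>
      let st := muts.foldl (fun (st : List (List String) × Bool) p =>
        if ((pvGetKey muts p.1).bind (fun m => pvGetKey m "known_change") == some "." &&
            (pvGetKey muts p.1).bind (fun m => pvGetKey m "unknown_change") == some ".")
        then (st.1 ++ [[key, p.1]], st.2)
        else (st.1, false)) (del_no_muts, true)
      (st.1, if st.2 then del_keys ++ [key] else del_keys)

-- ===== PORT B =====
-- B's recursive worker 'go': consumes the item pairs, returns (pairs to add, all-clean verdict),
-- prepending [key, n] on the way back.
def goNoChange (key : String) (items : List (String × List (String × String))) : List (List String) × Bool :=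
  match items with
  | [] => ([], true)
  | (n, v) :: rest =>
    let r := goNoChange key rest
    if (pvGetKey v "known_change" == some "." && pvGetKey v "unknown_change" == some ".")
    then ([key, n] :: r.1, r.2)
    else (r.1, false)

def no_change_alt (del_no_muts : List (List String)) (del_keys : List String) (res_dic : List (String × List (String × List (String × List (String × String))))) (key : String) : List (List String) × List String :=
  match pvGetKey res_dic key with
  | none => (del_no_muts, del_keys)   -- Python: KeyError (outside Pre_)
  | some entry =>
    match pvGetKey entry "mutations" with
    | none => (del_no_muts, del_keys) -- Python: KeyError (outside Pre_)
    | some muts =>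
      let r := goNoChange key muts
      (del_no_muts ++ r.1, if r.2 then del_keys ++ [key] else del_keys)

-- ===== PRECONDITION & SPEC =====
-- Pre_ excludes exactly (a) the inputs on which Python A raises KeyError: key missing from
-- res_dic, 'mutations' missing from its entry, or (following A's short-circuit) a mutation
-- whose dict lacks 'known_change', or lacks 'unknown_change' while known_change == '.';
-- and (b) association lists whose mutation names repeat — a Python dict has distinct keys,
-- so such lists correspond to no Python input at all.
def pvPreCheck (res_dic : List (String × List (String × List (String × List (String × String))))) (key : String) : Bool :=
  match pvGetKey res_dic key with
  | none => false
  | some entry =>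
    match pvGetKey entry "mutations" with
    | none => false
    | some muts =>
      (muts.map Prod.fst).Nodup
        && muts.all (fun p =>
          match (pvGetKey muts p.1) with
          | none => false
          | some m =>
            (pvGetKey m "known_change").isSome
              && (!(pvGetKey m "known_change" == some ".") || (pvGetKey m "unknown_change").isSome))
def Pre_no_change (_del_no_muts : List (List String)) (_del_keys : List String) (res_dic : List (String × List (String × List (String × List (String × String))))) (key : String) : Prop :=
  pvPreCheck res_dic key = true
instance (del_no_muts : List (List String)) (del_keys : List String) (res_dic : List (String × List (String × List (String × List (String × String))))) (key : String) : Decidable (Pre_no_change del_no_muts del_keys res_dic key) := by unfold Pre_no_change; infer_instance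

def pvWitness_no_change : List (List String) × List String × (List (String × List (String × List (String × List (String × String))))) × String :=
  ([], [], [("k", [("mutations", [("a", [("known_change", "."), ("unknown_change", ".")]), ("b", [("known_change", "X"), ("unknown_change", ".")])])])], "k")

def Spec_no_change (del_no_muts : List (List String)) (del_keys : List String) (res_dic : List (String × List (String × List (String × List (String × String))))) (key : String) (out : List (List String) × List String) : Prop := out = no_change_alt del_no_muts del_keys res_dic key
instance (del_no_muts : List (List String)) (del_keys : List String) (res_dic : List (String × List (String × List (String × List (String × String))))) (key : String) (out : List (List String) × List String) : Decidable (Spec_no_change del_no_muts del_keys res_dic key out) := by unfold Spec_no_change; infer_instance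

-- ===== CLAIM (what is proved, stated in full; the proofs are below) =====
def Claim_equal_no_change : Prop := ∀ (del_no_muts : List (List String)) (del_keys : List String) (res_dic : List (String × List (String × List (String × List (String × String))))) (key : String), Dom_no_change del_no_muts del_keys res_dic key → Pre_no_change del_no_muts del_keys res_dic key → Spec_no_change del_no_muts del_keys res_dic key (no_change del_no_muts del_keys res_dic key)

-- ===== LEMMAS AND PROOFS =====

-- On an association list with distinct first components, lookup of a member's key returns its value.
theorem pvGetKey_of_mem {β : Type} {l : List (String × β)} (hnd : (l.map Prod.fst).Nodup)
    {p : String × β} (hp : p ∈ l) : pvGetKey l p.1 = some p.2 := by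
  induction l with
  | nil => cases hp
  | cons q t ih =>
    simp only [List.map_cons, List.nodup_cons, List.mem_map] at hnd
    cases hp with
    | head => simp [pvGetKey]
    | tail _ hp =>
      have hne : q.1 ≠ p.1 := fun h => hnd.1 ⟨p, hp, h.symm⟩
      simp [pvGetKey, (by simpa using hne : ¬ (q.1 == p.1) = true), ih hnd.2 hp]

-- A's loop accumulates exactly the filtered-and-mapped list, and its flag is 'all entries pass'.
theorem foldA_eq {β : Type} (pred : String × β → Bool) (key : String)
    (l : List (String × β)) (acc : List (List String)) (b : Bool) :
    l.foldl (fun (st : List (List String) × Bool) p =>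
        if pred p then (st.1 ++ [[key, p.1]], st.2) else (st.1, false)) (acc, b)
      = (acc ++ (l.filter pred).map (fun p => [key, p.1]),
         b && l.all pred) := by
  induction l generalizing acc b with
  | nil => simp
  | cons p t ih =>
    by_cases h : pred p = true
    · simp [List.foldl_cons, h, ih]
    · simp [List.foldl_cons, h, ih, Bool.false_and]

theorem all_congr_mem {α : Type} {l : List α} {f g : α → Bool} (h : ∀ x ∈ l, f x = g x) :
    l.all f = l.all g := by
  induction l with
  | nil => rfl
  | cons x t ih =>
    simp only [List.all_cons, h x (List.mem_cons_self ..),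
      ih (fun y hy => h y (List.mem_cons_of_mem _ hy))]

-- B's recursion computes the same filtered-and-mapped list and the same all-pass verdict.
theorem goNoChange_eq (key : String) (l : List (String × List (String × String))) :
    goNoChange key l
      = ((l.filter (fun p => pvGetKey p.2 "known_change" == some "." &&
                             pvGetKey p.2 "unknown_change" == some ".")).map (fun p => [key, p.1]),
         l.all (fun p => pvGetKey p.2 "known_change" == some "." &&
                         pvGetKey p.2 "unknown_change" == some ".")) := by
  induction l with
  | nil => rfl
  | cons p t ih =>
    by_cases h : (pvGetKey p.2 "known_change" == some "." &&
                  pvGetKey p.2 "unknown_change" == some ".") = true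
    · simp [goNoChange, h, ih]
    · simp [goNoChange, h, ih]

-- ===== VERDICT (by name: the statement is the Claim_ definition above) =====
theorem no_change_spec : Claim_equal_no_change := by
  intro dnm dk res key _ hpre
  unfold Spec_no_change no_change no_change_alt
  unfold Pre_no_change pvPreCheck at hpre
  cases hres : pvGetKey res key with
  | none => simp [hres] at hpre
  | some entry =>
    simp only [hres] at hpre ⊢
    cases hent : pvGetKey entry "mutations" with
    | none => simp [hent] at hpre
    | some muts =>
      simp only [hent] at hpre ⊢
      have hnd : (muts.map Prod.fst).Nodup := by
        simpa using (Bool.and_eq_true_iff.mp hpre).1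
      rw [foldA_eq, goNoChange_eq]
      have hcongr : ∀ p ∈ muts,
          ((pvGetKey muts p.1).bind (fun m => pvGetKey m "known_change") == some "." &&
           (pvGetKey muts p.1).bind (fun m => pvGetKey m "unknown_change") == some ".")
          = (pvGetKey p.2 "known_change" == some "." &&
             pvGetKey p.2 "unknown_change" == some ".") := by
        intro p hp
        rw [pvGetKey_of_mem hnd hp]
        rfl
      rw [List.filter_congr hcongr, Bool.true_and]
      have : muts.all (fun p =>
          ((pvGetKey muts p.1).bind (fun m => pvGetKey m "known_change") == some "." &&
           (pvGetKey muts p.1).bind (fun m => pvGetKey m "unknown_change") == some "."))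
          = muts.all (fun p => (pvGetKey p.2 "known_change" == some "." &&
             pvGetKey p.2 "unknown_change" == some ".")) := by
        exact all_congr_mem hcongr
      rw [this]
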